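-- pv_equiv track=rewrite | github.com/wahhajjaved/large_language_maniacs | downloaded_data/ctssb/cache/transformer_5ff31329ac0d9510dd080db94eb15084141428c9_before.py | gen_multi_padded_batch
-- ===== SOURCE A (Python) =====
-- def pad_seqs(seqs, maxlen=None, PAD_ID=0):
--     maxlen = maxlen or max(len(seq) for seq in seqs)
--     return [seq + [PAD_ID] * (maxlen - len(seq)) for seq in seqs]
--
-- def gen_multi_padded_batch(multi_seq_iter, batch_size, PAD_ID=0):
--     batches = []
--     for items in multi_seq_iter:
--         if len(batches) == batch_size:
--             # [batch, nitmes]-> [nitems, batch]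
--             yield tuple(
--                 (pad_seqs(seqs, PAD_ID=PAD_ID), [len(seq) for seq in seqs])
--                 for seqs in zip(*batches))
--             batches = []
--
--         batches.append(items)
--
--     if len(batches) > 0:
--         yield tuple(
--             (pad_seqs(seqs, PAD_ID=PAD_ID), [len(seq) for seq in seqs])
--             for seqs in zip(*batches))
-- ===== SOURCE B (Python) =====
-- from itertools import islice
--
-- def pad_seqs(seqs, maxlen=None, PAD_ID=0):
--     maxlen = maxlen or max(len(seq) for seq in seqs)
--     return [seq + [PAD_ID] * (maxlen - len(seq)) for seq in seqs]
--
-- def gen_multi_padded_batch(multi_seq_iter, batch_size, PAD_ID=0):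
--     # non-positive batch_size means no batching limit: everything in one batch
--     it = iter(multi_seq_iter)
--     while True:
--         batch = list(islice(it, batch_size)) if batch_size >= 1 else list(it)
--         if not batch:
--             break
--         yield tuple(
--             (pad_seqs(seqs, PAD_ID=PAD_ID), [len(seq) for seq in seqs])
--             for seqs in zip(*batch))
-- ===== Notes on version B (the rewrite author's own statement) =====
-- stated objective: simpler
-- what changed: B replaces A's running-counter accumulator with pre-check flush and deferred final yield by explicit fixed-size chunk extraction (islice chunking in a while loop, non-positive batch_size meaning no limit), yielding one transposed-padded batch per chunk.
-- intended difference: At batch_size = 0 with a nonempty iterator, A yields a spurious leading empty tuple (its empty accumulator is flushed before the first append) followed by one batch of everything, while B yields just the single batch of everything, the intended 'no batching limit' value. — e.g. on gen_multi_padded_batch([[[1]]], 0, 0): A returns [[], [([[1]], [1])]], B returns [[([[1]], [1])]]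
import Mathlib
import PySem

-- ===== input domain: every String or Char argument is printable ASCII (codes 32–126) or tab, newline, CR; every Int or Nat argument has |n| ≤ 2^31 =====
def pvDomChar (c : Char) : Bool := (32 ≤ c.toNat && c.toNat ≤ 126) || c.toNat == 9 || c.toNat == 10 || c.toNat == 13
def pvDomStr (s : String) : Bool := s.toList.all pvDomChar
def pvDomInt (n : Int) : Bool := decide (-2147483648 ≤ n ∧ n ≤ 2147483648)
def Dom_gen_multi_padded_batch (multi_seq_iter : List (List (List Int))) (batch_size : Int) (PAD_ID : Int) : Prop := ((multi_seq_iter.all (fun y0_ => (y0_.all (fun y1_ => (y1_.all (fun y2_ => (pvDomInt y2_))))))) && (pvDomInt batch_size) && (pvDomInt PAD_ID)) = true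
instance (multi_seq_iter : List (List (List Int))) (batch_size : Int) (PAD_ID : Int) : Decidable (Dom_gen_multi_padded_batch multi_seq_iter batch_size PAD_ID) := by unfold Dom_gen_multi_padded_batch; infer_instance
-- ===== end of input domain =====

-- B yields one transposed-padded batch per fixed-size chunk (islice chunking, non-positive
-- batch_size = no limit) instead of A's running-counter accumulator with deferred flush;
-- they agree except at batch_size = 0 on nonempty input (see D_ below).

-- ===== PORT A =====

-- pad_seqs (always called with maxlen=None here): maxlen = max(len(seq) for seq in seqs)
-- (max over a nonempty list of Nat lengths; base 0 is only reached on [], which A never passes),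
-- then pad each seq on the right with PAD_ID up to maxlen.
def padSeqs (seqs : List (List Int)) (PAD_ID : Int) : List (List Int) :=
  let maxlen : Nat := (seqs.map (fun s => s.length)).foldl max 0
  seqs.map (fun s => s ++ List.replicate (maxlen - s.length) PAD_ID)

-- zip(*batches): transpose truncated to the shortest row (exactly Python's zip).
def zipStar (bs : List (List (List Int))) : List (List (List Int)) :=
  match bs with
  | [] => []
  | b :: rest =>
    let n : Nat := rest.foldl (fun m l => min m l.length) b.length
    (List.range n).map (fun i => (b :: rest).map (fun l => l.getD i []))

-- the tuple yielded for one accumulated batch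
def mkBatch (batch : List (List (List Int))) (PAD_ID : Int) : List (List (List Int) × List Int) :=
  (zipStar batch).map (fun seqs => (padSeqs seqs PAD_ID, seqs.map (fun s => (s.length : Int))))

-- A's loop: flush the accumulator when its length reaches batch_size, then append; final flush.
def genA_go (batch_size PAD_ID : Int) (batches : List (List (List Int))) :
    List (List (List Int)) → List (List (List (List Int) × List Int))
  | [] => if batches.length > 0 then [mkBatch batches PAD_ID] else []
  | items :: rest =>
    if (batches.length : Int) = batch_size then
      mkBatch batches PAD_ID :: genA_go batch_size PAD_ID [items] rest
    else
      genA_go batch_size PAD_ID (batches ++ [items]) rest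

def gen_multi_padded_batch (multi_seq_iter : List (List (List Int))) (batch_size : Int) (PAD_ID : Int) : List (List (List (List Int) × List Int)) :=
  genA_go batch_size PAD_ID [] multi_seq_iter

-- ===== PORT B =====

-- while True: batch = list(islice(it, batch_size)) if batch_size >= 1 else list(it);
--             if not batch: break; yield the transposed-padded batch.
-- batch_size.toNat = 0 exactly when batch_size < 1, i.e. the 'no limit' branch.
-- (structural fuel = list length, only to make the recursion kernel-reducible; the loop itself
-- consumes its chunk each round exactly like Source B's while loop)
def chunkFuel (n : Nat) : Nat → List (List (List Int)) → List (List (List (List Int)))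
  | _, [] => []
  | 0, _ :: _ => []  -- fuel exhausted: unreachable, chunkList supplies fuel = length
  | fuel + 1, x :: xs =>
    if n = 0 then [x :: xs]
    else (x :: xs).take n :: chunkFuel n fuel ((x :: xs).drop n)

def chunkList (n : Nat) (xs : List (List (List Int))) : List (List (List (List Int))) :=
  chunkFuel n xs.length xs

def gen_multi_padded_batch_alt (multi_seq_iter : List (List (List Int))) (batch_size : Int) (PAD_ID : Int) : List (List (List (List Int) × List Int)) :=
  (chunkList batch_size.toNat multi_seq_iter).map (fun c => mkBatch c PAD_ID)

-- ===== PRECONDITION & SPEC =====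
-- At batch_size = 0 with a nonempty iterator A yields a leading empty tuple (its accumulator is
-- flushed while still empty, an artifact of checking before appending) followed by one batch of
-- everything; B yields just the single batch of everything, the intended 'no batching limit' value.
def D_gen_multi_padded_batch (multi_seq_iter : List (List (List Int))) (batch_size : Int) (PAD_ID : Int) : Prop := batch_size = 0 ∧ multi_seq_iter ≠ []
instance (multi_seq_iter : List (List (List Int))) (batch_size : Int) (PAD_ID : Int) : Decidable (D_gen_multi_padded_batch multi_seq_iter batch_size PAD_ID) := by unfold D_gen_multi_padded_batch; infer_instance
def Spec_gen_multi_padded_batch (multi_seq_iter : List (List (List Int))) (batch_size : Int) (PAD_ID : Int) (out : List (List (List (List Int) × List Int))) : Prop := ¬ D_gen_multi_padded_batch multi_seq_iter batch_size PAD_ID → out = gen_multi_padded_batch_alt multi_seq_iter batch_size PAD_ID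
instance (multi_seq_iter : List (List (List Int))) (batch_size : Int) (PAD_ID : Int) (out : List (List (List (List Int) × List Int))) : Decidable (Spec_gen_multi_padded_batch multi_seq_iter batch_size PAD_ID out) := by unfold Spec_gen_multi_padded_batch; infer_instance
def pvDiffWitness_gen_multi_padded_batch : List (List (List Int)) × Int × Int := ([[[1]]], 0, 0)
def pvDiffWitnessOut_gen_multi_padded_batch : (List (List (List (List Int) × List Int))) × (List (List (List (List Int) × List Int))) := ([[], [([[1]], [1])]], [[([[1]], [1])]])

-- ===== CLAIM (what is proved, stated in full; the proofs are below) =====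
def Claim_unchanged_gen_multi_padded_batch : Prop := ∀ (multi_seq_iter : List (List (List Int))) (batch_size : Int) (PAD_ID : Int), Dom_gen_multi_padded_batch multi_seq_iter batch_size PAD_ID → Spec_gen_multi_padded_batch multi_seq_iter batch_size PAD_ID (gen_multi_padded_batch multi_seq_iter batch_size PAD_ID)
def Claim_changed_gen_multi_padded_batch : Prop := Dom_gen_multi_padded_batch (pvDiffWitness_gen_multi_padded_batch.1) (pvDiffWitness_gen_multi_padded_batch.2.1) (pvDiffWitness_gen_multi_padded_batch.2.2) ∧ D_gen_multi_padded_batch (pvDiffWitness_gen_multi_padded_batch.1) (pvDiffWitness_gen_multi_padded_batch.2.1) (pvDiffWitness_gen_multi_padded_batch.2.2) ∧ gen_multi_padded_batch (pvDiffWitness_gen_multi_padded_batch.1) (pvDiffWitness_gen_multi_padded_batch.2.1) (pvDiffWitness_gen_multi_padded_batch.2.2) = pvDiffWitnessOut_gen_multi_padded_batch.1 ∧ gen_multi_padded_batch_alt (pvDiffWitness_gen_multi_padded_batch.1) (pvDiffWitness_gen_multi_padded_batch.2.1) (pvDiffWitness_gen_multi_padded_batch.2.2) = pvDiffWitnessOut_gen_multi_padded_batch.2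 ∧ pvDiffWitnessOut_gen_multi_padded_batch.1 ≠ pvDiffWitnessOut_gen_multi_padded_batch.2
def Claim_exact_gen_multi_padded_batch : Prop := ∀ (multi_seq_iter : List (List (List Int))) (batch_size : Int) (PAD_ID : Int), Dom_gen_multi_padded_batch multi_seq_iter batch_size PAD_ID → D_gen_multi_padded_batch multi_seq_iter batch_size PAD_ID → gen_multi_padded_batch multi_seq_iter batch_size PAD_ID ≠ gen_multi_padded_batch_alt multi_seq_iter batch_size PAD_ID

-- ===== LEMMAS AND PROOFS =====

theorem chunkFuel_congr (n : Nat) :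
    ∀ (f g : Nat) (xs : List (List (List Int))), xs.length ≤ f → xs.length ≤ g →
      chunkFuel n f xs = chunkFuel n g xs := by
  intro f
  induction f with
  | zero =>
    intro g xs hf _
    have : xs = [] := by simpa [List.length_eq_zero_iff] using Nat.le_zero.mp hf
    subst this; cases g <;> rfl
  | succ f ih =>
    intro g xs hf hg
    cases xs with
    | nil => cases g <;> rfl
    | cons x t =>
      cases g with
      | zero => simp at hg
      | succ g =>
        by_cases hn : n = 0
        · simp [chunkFuel, hn]
        · have h1 : ((x :: t).drop n).length ≤ f := by
            simp [List.length_drop]; simp at hf; omega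
          have h2 : ((x :: t).drop n).length ≤ g := by
            simp [List.length_drop]; simp at hg; omega
          simp [chunkFuel, hn, ih g ((x :: t).drop n) h1 h2]

theorem chunkList_nil (n : Nat) : chunkList n [] = [] := rfl

theorem chunkList_zero (xs : List (List (List Int))) (hx : xs ≠ []) : chunkList 0 xs = [xs] := by
  cases xs with
  | nil => exact absurd rfl hx
  | cons x t => simp [chunkList, chunkFuel]

theorem chunkList_cons (n : Nat) (xs : List (List (List Int))) (hx : xs ≠ []) (hn : n ≠ 0) :
    chunkList n xs = xs.take n :: chunkList n (xs.drop n) := by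
  cases xs with
  | nil => exact absurd rfl hx
  | cons x t =>
    unfold chunkList
    rw [show (x :: t).length = t.length + 1 from rfl]
    rw [chunkFuel, if_neg hn]
    congr 1
    have hn1 : 1 ≤ n := Nat.one_le_iff_ne_zero.mpr hn
    exact chunkFuel_congr n t.length ((x :: t).drop n).length ((x :: t).drop n)
      (by simp [List.length_drop]; omega) le_rfl

-- loop invariant, positive batch_size: with a nonempty accumulator of length ≤ n, A's loop
-- produces exactly the chunk decomposition of (batches ++ rest)
theorem genA_go_eq_chunks (bs PAD_ID : Int) (n : Nat) (hbs : bs = (n : Int)) (hn : 1 ≤ n) :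
    ∀ (rest batches : List (List (List Int))), batches ≠ [] → batches.length ≤ n →
      genA_go bs PAD_ID batches rest
        = (chunkList n (batches ++ rest)).map (fun c => mkBatch c PAD_ID) := by
  intro rest
  induction rest with
  | nil =>
    intro batches hne hle
    have h1 : batches.take n = batches := List.take_of_length_le hle
    have h2 : batches.drop n = [] := List.drop_eq_nil_of_le hle
    simp [genA_go, List.length_pos_iff.mpr hne,
      chunkList_cons n batches hne (by omega), h1, h2, chunkList_nil]
  | cons items rs ih =>
    intro batches hne hle
    by_cases hfull : batches.length = n
    · have hcond : (batches.length : Int) = bs := by simp [hbs, hfull]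
      have h1 : (batches ++ items :: rs).take n = batches := by
        rw [← hfull]; exact List.take_left ..
      have h2 : (batches ++ items :: rs).drop n = items :: rs := by
        rw [← hfull]; exact List.drop_left ..
      rw [genA_go, if_pos hcond,
        chunkList_cons n (batches ++ items :: rs) (by simp [hne]) (by omega), h1, h2]
      simp [ih [items] (by simp) (by simpa using hn)]
    · have hcond : ¬ (batches.length : Int) = bs := by
        simp [hbs]; omega
      rw [genA_go, if_neg hcond,
        ih (batches ++ [items]) (by simp) (by simp; omega)]
      simp

-- loop invariant, non-positive batch_size with a nonempty accumulator: the flush condition can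
-- never fire again, so everything ends up in the single final batch
theorem genA_go_nonpos (bs PAD_ID : Int) (hbs : bs ≤ 0) :
    ∀ (rest batches : List (List (List Int))), batches ≠ [] →
      genA_go bs PAD_ID batches rest = [mkBatch (batches ++ rest) PAD_ID] := by
  intro rest
  induction rest with
  | nil =>
    intro batches hne
    simp [genA_go, List.length_pos_iff.mpr hne]
  | cons items rs ih =>
    intro batches hne
    have hcond : ¬ (batches.length : Int) = bs := by
      have : 0 < batches.length := List.length_pos_iff.mpr hne
      omega
    rw [genA_go, if_neg hcond, ih (batches ++ [items]) (by simp)]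
    simp

-- ===== VERDICT (by name: the statement is the Claim_ definition above) =====
theorem gen_multi_padded_batch_spec : Claim_unchanged_gen_multi_padded_batch := by
  intro ms bs PAD _ hnd
  unfold D_gen_multi_padded_batch at hnd
  unfold gen_multi_padded_batch gen_multi_padded_batch_alt
  cases ms with
  | nil => simp [genA_go, chunkList_nil]
  | cons items rest =>
    have hne : items :: rest ≠ ([] : List (List (List Int))) := by simp
    by_cases hpos : 1 ≤ bs
    · -- positive batch_size: chunking invariant
      have hbs : bs = ((bs.toNat : Nat) : Int) := by omega
      have hn : 1 ≤ bs.toNat := by omega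
      have h0 : ¬ ((([] : List (List (List Int))).length : Int) = bs) := by simp; omega
      rw [genA_go, if_neg h0]
      simpa using genA_go_eq_chunks bs PAD bs.toNat hbs hn rest [items] (by simp) (by simpa using hn)
    · -- batch_size ≤ 0; batch_size = 0 is excluded by ¬D_ (ms is nonempty), so bs < 0
      have hneg : bs < 0 := by
        rcases (not_and_or.mp hnd) with h | h
        · omega
        · exact absurd hne (by simpa using h)
      have h0 : ¬ ((([] : List (List (List Int))).length : Int) = bs) := by simp; omega
      have htn : bs.toNat = 0 := by omega
      rw [genA_go, if_neg h0]
      simp only [List.nil_append]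
      rw [genA_go_nonpos bs PAD (by omega) rest [items] (by simp), htn, chunkList_zero _ hne]
      simp

theorem gen_multi_padded_batch_changed : Claim_changed_gen_multi_padded_batch := by
  unfold Claim_changed_gen_multi_padded_batch; decide

theorem gen_multi_padded_batch_tight : Claim_exact_gen_multi_padded_batch := by
  intro ms bs PAD _ hd
  unfold D_gen_multi_padded_batch at hd
  obtain ⟨hbs, hne⟩ := hd
  cases ms with
  | nil => exact absurd rfl hne
  | cons items rest =>
    unfold gen_multi_padded_batch gen_multi_padded_batch_alt
    have h0 : ((([] : List (List (List Int))).length : Int) = bs) := by simp [hbs]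
    rw [genA_go, if_pos h0, genA_go_nonpos bs PAD (by omega) rest [items] (by simp),
      hbs]
    simp [chunkList_zero _ (by simp : items :: rest ≠ ([] : List (List (List Int))))]
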